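-- pv_equiv track=rewrite | github.com/missingdays/nerdy.python | challenges/contests/code_forces/edu2/a.py | isCorrectNumber
-- ===== SOURCE A (Python) =====
-- def isCorrectNumber(n):
--     if len(n) == 0:
--         return False
--
--     if len(n) == 1:
--         return "0" <= n[0] <= "9"
--
--     if not ("0" < n[0] <= "9"):
--         return False
--
--     for i in range(1, len(n)):
--         if not ("0" <= n[i] <= "9"):
--             return False
--     return True
-- ===== SOURCE B (Python) =====
-- def isCorrectNumber(n):
--     # DFA for the regular language 0 | [1-9][0-9]* :
--     # state 0 = start, 1 = accepted "0", 2 = in [1-9][0-9]*, 3 = dead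
--     state = 0
--     for c in n:
--         if state == 0:
--             state = 1 if c == "0" else 2 if "1" <= c <= "9" else 3
--         elif state == 2:
--             state = 2 if "0" <= c <= "9" else 3
--         else:
--             state = 3
--     return state == 1 or state == 2
-- ===== Notes on version B (the rewrite author's own statement) =====
-- stated objective: alternative
-- what changed: Replaces A's length branches, first-character test and index loop by a single fold of a four-state DFA (the automaton for the regular language 0|[1-9][0-9]*) over the characters.
import Mathlib
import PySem

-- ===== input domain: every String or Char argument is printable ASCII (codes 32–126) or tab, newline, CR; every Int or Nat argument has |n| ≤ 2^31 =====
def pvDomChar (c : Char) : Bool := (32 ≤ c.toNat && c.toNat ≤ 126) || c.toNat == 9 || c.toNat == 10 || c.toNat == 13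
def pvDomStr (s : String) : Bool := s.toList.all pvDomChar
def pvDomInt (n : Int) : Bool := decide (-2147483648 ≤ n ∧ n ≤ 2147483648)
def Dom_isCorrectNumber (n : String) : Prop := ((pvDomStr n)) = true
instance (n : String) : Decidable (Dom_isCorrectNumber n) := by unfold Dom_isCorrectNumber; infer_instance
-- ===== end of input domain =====

-- B replaces A's length branches and index loop by a single fold of the four-state DFA for 0|[1-9][0-9]* (alternative algorithm, same cost).


-- ===== PORT A =====
-- the 'for i in range(1, len(n))' loop with its early 'return False'
def pvLoopA (n : String) : List Int → Bool
  | [] => true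
  | i :: rest =>
    match PySem.Str.pyGet? n i with
    | none => false  -- unreachable: i is in range
    | some c => if ¬('0' ≤ c ∧ c ≤ '9') then false else pvLoopA n rest

def isCorrectNumber (n : String) : Bool :=
  if PySem.Str.len n = 0 then false
  else if PySem.Str.len n = 1 then
    match PySem.Str.pyGet? n 0 with
    | none => false  -- unreachable
    | some c => decide ('0' ≤ c ∧ c ≤ '9')
  else
    match PySem.Str.pyGet? n 0 with
    | none => false  -- unreachable
    | some c =>
      if ¬('0' < c ∧ c ≤ '9') then false
      else pvLoopA n (PySem.List.pyRange 1 (PySem.Str.len n))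

-- ===== PORT B =====
-- DFA transition: 0 = start, 1 = accepted "0", 2 = in [1-9][0-9]*, 3 = dead
def pvStep (state : Int) (c : Char) : Int :=
  if state = 0 then
    if c = '0' then 1 else if '1' ≤ c ∧ c ≤ '9' then 2 else 3
  else if state = 2 then
    if '0' ≤ c ∧ c ≤ '9' then 2 else 3
  else 3

def isCorrectNumber_alt (n : String) : Bool :=
  let s := n.toList.foldl pvStep 0
  s == 1 || s == 2

-- ===== PRECONDITION & SPEC =====
def Spec_isCorrectNumber (n : String) (out : Bool) : Prop := out = isCorrectNumber_alt n
instance (n : String) (out : Bool) : Decidable (Spec_isCorrectNumber n out) := by unfold Spec_isCorrectNumber; infer_instance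

-- ===== CLAIM (what is proved, stated in full; the proofs are below) =====
def Claim_equal_isCorrectNumber : Prop := ∀ (n : String), Dom_isCorrectNumber n → Spec_isCorrectNumber n (isCorrectNumber n)

-- ===== LEMMAS AND PROOFS =====

theorem pvLoopA_eq (n : String) (j : Nat) :
    pvLoopA n (PySem.List.pyRange (j : Int) (PySem.Str.len n)) =
      (n.toList.drop j).all PySem.Chars.isdigit := by
  by_cases h : j < n.toList.length
  · rw [PySem.List.pyRange_one_cons (by simp [PySem.Str.len]; exact_mod_cast h)]
    have hget : PySem.Str.pyGet? n (j : Int) = n.toList[j]? := by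
      simp [PySem.Str.pyGet?]
    have ih := pvLoopA_eq n (j + 1)
    simp only [pvLoopA, hget, List.getElem?_eq_getElem h]
    rw [List.drop_eq_getElem_cons h]
    push_cast at ih ⊢
    rw [ih]
    simp only [List.all_cons, PySem.Chars.isdigit]
    by_cases hd : '0' ≤ n.toList[j] ∧ n.toList[j] ≤ '9' <;> simp [hd]
  · have he : PySem.List.pyRange (j : Int) (PySem.Str.len n) = [] := by
      apply PySem.List.pyRange_one_eq_nil
      simp only [PySem.Str.len]
      exact_mod_cast (by omega : n.toList.length ≤ j)
    rw [he, List.drop_eq_nil_of_le (by omega)]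
    rfl
termination_by n.toList.length - j
decreasing_by exact Nat.sub_succ_lt_self _ _ (by simpa using h)

-- dead state stays dead
theorem pvFold3 (cs : List Char) : cs.foldl pvStep 3 = 3 := by
  induction cs with
  | nil => rfl
  | cons c cs ih => simpa [pvStep] using ih

-- from state 2, the fold accepts exactly the all-digit strings
theorem pvFold2 (cs : List Char) :
    cs.foldl pvStep 2 = (if cs.all PySem.Chars.isdigit then 2 else 3) := by
  induction cs with
  | nil => rfl
  | cons c cs ih =>
    by_cases h : '0' ≤ c ∧ c ≤ '9'
    · simp [pvStep, h, PySem.Chars.isdigit, ih]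
    · simp [pvStep, h, PySem.Chars.isdigit, pvFold3]

theorem pvOneLe {c : Char} (h : '1' ≤ c) : '0' < c := by
  simp only [Char.le_def, Char.lt_def, UInt32.le_iff_toNat_le, UInt32.lt_iff_toNat_lt] at *
  rw [show ('1':Char).val.toNat = 49 from by decide] at h
  rw [show ('0':Char).val.toNat = 48 from by decide]
  omega

theorem pvLeOne {c : Char} (h : '0' < c) : '1' ≤ c := by
  simp only [Char.le_def, Char.lt_def, UInt32.le_iff_toNat_le, UInt32.lt_iff_toNat_lt] at *
  rw [show ('0':Char).val.toNat = 48 from by decide] at h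
  rw [show ('1':Char).val.toNat = 49 from by decide]
  omega

-- ===== VERDICT (by name: the statement is the Claim_ definition above) =====
theorem isCorrectNumber_spec : Claim_equal_isCorrectNumber := by
  intro n _
  unfold Spec_isCorrectNumber isCorrectNumber isCorrectNumber_alt
  rcases hl : n.toList with _ | ⟨c, rest⟩
  · simp [PySem.Str.len, hl]
  · have hget : PySem.Str.pyGet? n 0 = some c := by
      simp [PySem.Str.pyGet?, PySem.Chars.pyGet?, hl]
    rcases hr : rest with _ | ⟨d, rest'⟩
    · subst hr
      have h1 : PySem.Str.len n = 1 := by simp [PySem.Str.len, hl]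
      rw [h1, if_neg (by omega : ¬ (1:Int) = 0), if_pos rfl, hget]
      dsimp only
      by_cases hc0 : c = '0'
      · subst hc0; simp [pvStep]
      · by_cases h9 : '1' ≤ c ∧ c ≤ '9'
        · have : '0' ≤ c := le_trans (by decide) h9.1
          simp [pvStep, hc0, h9, this]
        · have : ¬('0' ≤ c ∧ c ≤ '9') := by
            rintro ⟨ha, hb⟩
            apply h9
            refine ⟨?_, hb⟩
            rcases eq_or_lt_of_le ha with he | hlt
            · exact absurd he.symm hc0
            · exact pvLeOne hlt
          simp [pvStep, hc0, h9, this]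
    · have hlen : PySem.Str.len n = ((rest'.length : Int) + 2) := by
        simp only [PySem.Str.len, hl, hr, List.length_cons]
        push_cast; omega
      have hne0 : ¬ (PySem.Str.len n = 0) := by rw [hlen]; omega
      have hne1 : ¬ (PySem.Str.len n = 1) := by rw [hlen]; omega
      have hloop := pvLoopA_eq n 1
      rw [hl] at hloop
      simp only [List.drop_one, List.tail_cons, Nat.cast_one] at hloop
      rw [if_neg hne0, if_neg hne1, hget, hloop, hr]
      dsimp only
      simp only [List.foldl_cons]
      have hstep1 : pvStep 1 d = 3 := by simp [pvStep]
      have hstep3 : pvStep 3 d = 3 := by simp [pvStep]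
      by_cases hc0 : c = '0'
      · subst hc0
        rw [show pvStep 0 '0' = 1 from by decide, hstep1, pvFold3]
        simp
      · by_cases h9 : '1' ≤ c ∧ c ≤ '9'
        · rw [show pvStep 0 c = 2 from by simp [pvStep, hc0, h9]]
          have hAcond : '0' < c ∧ c ≤ '9' := by
            exact ⟨pvOneLe h9.1, h9.2⟩
          rw [if_neg (not_not_intro hAcond)]
          by_cases hd : '0' ≤ d ∧ d ≤ '9'
          · rw [show pvStep 2 d = 2 from by simp [pvStep, hd], pvFold2]
            simp only [List.all_cons, PySem.Chars.isdigit, hd, decide_true, Bool.true_and]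
            split_ifs with hall <;> simp [hall]
          · rw [show pvStep 2 d = 3 from by simp [pvStep, hd], pvFold3]
            simp [PySem.Chars.isdigit, hd]
        · have hAcond : ¬('0' < c ∧ c ≤ '9') := by
            rintro ⟨ha, hb⟩
            apply h9
            exact ⟨pvLeOne ha, hb⟩
          rw [show pvStep 0 c = 3 from by simp [pvStep, hc0, h9], hstep3, pvFold3]
          simp [hAcond]
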